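-- pv_equiv track=rewrite | github.com/sambrody62/growthbenchmarksv2 | api/fathom/lib/convert_to_datum.py | convert_to_datum
-- ===== SOURCE A (Python) =====
-- def convert_to_datum(data):
--     """Takes performance data and converts it to datum format.
--     - data:
--         [{
--             'clicks': '2',
--             'date_start': '2020-12-01',
--             'impressions': '214',
--             'spend': '5.36',
--             'post_reaction': '1',
--             'post_engagement': '1',
--             'page_engagement': '1',
--             'date_saved': '2021-03-01'
--         }, {
--             'clicks': '2',
--             'date_start': '2020-12-02',
--             'impressions': '214',
--             'spend': '5.36',
--             'post_reaction': '1',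
--             'post_engagement': '1',
--             'page_engagement': '1',
--             'date_saved': '2021-03-01'
--         }, {
--             'clicks': '10000',
--             'date_start': '2020-12-03',
--             'impressions': '214',
--             'spend': '5.36',
--             'post_reaction': '1',
--             'post_engagement': '1',
--             'page_engagement': '1',
--             'date_saved': '2021-03-01'
--         }]
--     - returns:
--         {
--             'clicks': [
--                 {'date': '2020-12-01', 'value': '2'},
--                 {'date': '2020-12-02', 'value': '2'},
--                 {'date': '2020-12-03', 'value': '1000'},
--                 ],
--             'impressions': [
--                 {'date': '2020-12-01', 'value': '214'},
--                 {'date': '2020-12-02', 'value': '214'},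
--                 {'date': '2020-12-03', 'value': '214'},
--                 ],
--             'spend': [
--                 {'date': '2020-12-01', 'value': '5.36'},
--                 {'date': '2020-12-02', 'value': '5.36'},
--                 {'date': '2020-12-03', 'value': '5.36'},
--                 ],
--             'post_reaction': [
--                 {'date': '2020-12-01', 'value': '1'},
--                 {'date': '2020-12-02', 'value': '1'},
--                 {'date': '2020-12-03', 'value': '1'},
--                 ],
--             'post_engagement': [
--                 {'date': '2020-12-01', 'value': '1'},
--                 {'date': '2020-12-02', 'value': '1'},
--                 {'date': '2020-12-03', 'value': '1'},
--                 ],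
--             'page_engagement': [
--                 {'date': '2020-12-01', 'value': '1'},
--                 {'date': '2020-12-02', 'value': '1'},
--                 {'date': '2020-12-03', 'value': '1'},
--                 ],
--         }
--     """
--     metrics = {}
--     for day in data:
--         base_datum = {'date': day['date_start']}
--         for metric, value in day.items():
--             if metric in ['date_start', 'date_saved']:
--                 pass
--             else:
--                 datum = base_datum.copy()
--                 datum['value'] = value
--
--                 if metric in metrics.keys():
--                     metrics[metric].append(datum)
--                 else:
--                     metrics[metric] = [datum]
--
--     return metrics
-- ===== SOURCE B (Python) =====
-- def convert_to_datum(data):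
--     skip = ('date_start', 'date_saved')
--     metrics = dict.fromkeys(k for day in data for k in day if k not in skip)
--     return {
--         m: [{'date': day['date_start'], 'value': day[m]} for day in data if m in day]
--         for m in metrics
--     }
-- ===== Notes on version B (the rewrite author's own statement) =====
-- stated objective: simpler
-- what changed: Inverts the loop nesting: one pass collects the ordered de-duplicated metric names (dict.fromkeys), then a dict comprehension builds each metric's date/value list by scanning the days, instead of A's day-by-day incremental dict insertion.
import Mathlib
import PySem

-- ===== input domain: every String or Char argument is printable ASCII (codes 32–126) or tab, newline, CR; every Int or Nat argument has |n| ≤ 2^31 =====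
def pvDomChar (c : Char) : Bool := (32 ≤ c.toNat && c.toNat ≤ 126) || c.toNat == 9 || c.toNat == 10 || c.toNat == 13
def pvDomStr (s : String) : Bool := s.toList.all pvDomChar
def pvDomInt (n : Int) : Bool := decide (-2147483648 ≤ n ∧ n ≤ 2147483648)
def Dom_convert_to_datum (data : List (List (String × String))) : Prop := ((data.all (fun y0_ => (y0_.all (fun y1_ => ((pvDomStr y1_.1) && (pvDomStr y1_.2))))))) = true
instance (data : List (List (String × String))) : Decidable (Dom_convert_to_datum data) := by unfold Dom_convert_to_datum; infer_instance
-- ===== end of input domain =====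

-- B changes the decomposition (metric names collected first, then a per-metric scan of the days) — objective: simpler.

-- ===== PORT A =====
-- literal transliteration of A: day-by-day loop, incremental dict of metric → datum list
def convert_to_datum (data : List (List (String × String))) : List (String × List (List (String × String))) :=
  (data.foldl (fun metrics day =>
      let base_datum : List (String × String) := [("date", (PySem.Dict.mk day).getD "date_start" "")]
      day.foldl (fun metrics p =>
        if p.1 == "date_start" || p.1 == "date_saved" then metrics
        else
          let datum := base_datum ++ [("value", p.2)]
          if metrics.contains p.1 then metrics.modify p.1 [] (fun l => l ++ [datum])
          else metrics.insert p.1 [datum])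
        metrics)
    (PySem.Dict.empty : PySem.Dict String (List (List (String × String))))).items

-- ===== PORT B =====
-- transliteration of Source B: ordered de-duplicated metric names first, then a per-metric pass over the days
def convert_to_datum_alt (data : List (List (String × String))) : List (String × List (List (String × String))) :=
  let metrics := PySem.List.dedup (data.flatMap (fun day =>
      (day.map Prod.fst).filter (fun k => !(k == "date_start" || k == "date_saved"))))
  metrics.map (fun m => (m,
    (data.filter (fun day => (PySem.Dict.mk day).contains m)).map (fun day =>
      [("date", (PySem.Dict.mk day).getD "date_start" ""), ("value", (PySem.Dict.mk day).getD m "")])))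

-- ===== PRECONDITION & SPEC =====
-- Pre_ excludes days without a 'date_start' key (Python A raises KeyError there) and, association lists
-- being the stand-in for Python dicts, days whose key list has duplicates (no Python dict has them).
def Pre_convert_to_datum (data : List (List (String × String))) : Prop :=
  ∀ day ∈ data, "date_start" ∈ day.map Prod.fst ∧ (day.map Prod.fst).Nodup
instance (data : List (List (String × String))) : Decidable (Pre_convert_to_datum data) := by unfold Pre_convert_to_datum; infer_instance
def pvWitness_convert_to_datum : (List (List (String × String))) :=
  [[("date_start", "2020-12-01"), ("clicks", "2")], [("date_start", "2020-12-02"), ("clicks", "3"), ("date_saved", "2021-03-01")]]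

def Spec_convert_to_datum (data : List (List (String × String))) (out : List (String × List (List (String × String)))) : Prop := out = convert_to_datum_alt data
instance (data : List (List (String × String))) (out : List (String × List (List (String × String)))) : Decidable (Spec_convert_to_datum data out) := by unfold Spec_convert_to_datum; infer_instance

-- ===== CLAIM (what is proved, stated in full; the proofs are below) =====
def Claim_equal_convert_to_datum : Prop := ∀ (data : List (List (String × String))), Dom_convert_to_datum data → Pre_convert_to_datum data → Spec_convert_to_datum data (convert_to_datum data)

-- ===== LEMMAS AND PROOFS =====

-- proof-side vocabulary
def pvKeep (k : String) : Bool := !(k == "date_start" || k == "date_saved")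
def pvDatum (day : List (String × String)) (v : String) : List (String × String) :=
  [("date", (PySem.Dict.mk day).getD "date_start" ""), ("value", v)]
def pvStep (d : PySem.Dict String (List (List (String × String)))) (e : String × List (String × String)) :
    PySem.Dict String (List (List (String × String))) :=
  d.modify e.1 [] (fun l => l ++ [e.2])
theorem pv_step_collapse (d : PySem.Dict String (List (List (String × String)))) (k : String) (v : List (String × String)) :
    (if d.contains k then d.modify k [] (fun l => l ++ [v]) else d.insert k [v]) = d.modify k [] (fun l => l ++ [v]) := by
  by_cases h : d.contains k
  · simp [h]
  · simp [h, PySem.Dict.modify, PySem.Dict.getD_of_not_contains _ _ (by simpa using h)]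

theorem pv_inner_gen (D day : List (String × String)) (d : PySem.Dict String (List (List (String × String)))) :
    day.foldl (fun metrics p =>
        if p.1 == "date_start" || p.1 == "date_saved" then metrics
        else
          if metrics.contains p.1 then metrics.modify p.1 [] (fun l => l ++ [pvDatum D p.2])
          else metrics.insert p.1 [pvDatum D p.2]) d
    = ((day.filter (fun p => pvKeep p.1)).map (fun p => (p.1, pvDatum D p.2))).foldl pvStep d := by
  induction day generalizing d with
  | nil => rfl
  | cons a t ih =>
    by_cases h : (a.1 == "date_start" || a.1 == "date_saved") = true
    · have hk : pvKeep a.1 = false := by simp [pvKeep, h]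
      simp only [List.foldl_cons, List.filter_cons, hk]
      simp only [h, if_true]
      exact ih d
    · have hk : pvKeep a.1 = true := by simp [pvKeep]; simpa [pvKeep] using h
      simp only [List.foldl_cons, List.filter_cons, hk]
      simp only [h, if_false, Bool.false_eq_true]
      rw [pv_step_collapse]
      exact ih _

def pvEvents (data : List (List (String × String))) : List (String × List (String × String)) :=
  data.flatMap (fun day => (day.filter (fun p => pvKeep p.1)).map (fun p => (p.1, pvDatum day p.2)))

theorem pv_outer_gen (data : List (List (String × String))) (d : PySem.Dict String (List (List (String × String)))) :
    data.foldl (fun metrics day =>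
      let base_datum : List (String × String) := [("date", (PySem.Dict.mk day).getD "date_start" "")]
      day.foldl (fun metrics p =>
        if p.1 == "date_start" || p.1 == "date_saved" then metrics
        else
          let datum := base_datum ++ [("value", p.2)]
          if metrics.contains p.1 then metrics.modify p.1 [] (fun l => l ++ [datum])
          else metrics.insert p.1 [datum])
        metrics) d
    = (pvEvents data).foldl pvStep d := by
  induction data generalizing d with
  | nil => rfl
  | cons day rest ih =>
    simp only [List.foldl_cons, pvEvents, List.flatMap_cons, List.foldl_append]
    rw [← pvEvents]
    rw [← ih]
    congr 1
    have := pv_inner_gen day day d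
    simpa [pvDatum] using this

theorem pv_outer (data : List (List (String × String))) :
    convert_to_datum data = ((pvEvents data).foldl pvStep PySem.Dict.empty).items := by
  unfold convert_to_datum
  rw [pv_outer_gen]

theorem pv_grouped (es : List (String × List (String × String))) :
    (es.foldl pvStep PySem.Dict.empty).items
      = (PySem.List.dedup (es.map Prod.fst)).map
          (fun k => (k, (es.filter (fun p => p.1 == k)).map Prod.snd)) := by
  have hstep : pvStep = fun d (e : String × List (String × String)) => d.modify e.1 [] (fun l => l ++ [e.2]) := rfl
  rw [hstep]
  have hn : ((es.foldl (fun d e => d.modify e.1 [] (fun l => l ++ [e.2])) PySem.Dict.empty)).keys.Nodup := by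
    exact PySem.Dict.nodup_keys_foldl_modify_key es Prod.fst [] (fun d x => fun l => l ++ [x.2]) _ (by simp)
  rw [PySem.Dict.items_eq_map_keys _ hn []]
  rw [PySem.Dict.keys_foldl_modify_key es Prod.fst [] (fun d x => fun l => l ++ [x.2])]
  have hkeys : PySem.Set.update (PySem.Dict.empty : PySem.Dict String (List (List (String × String)))).keys (es.map Prod.fst)
      = PySem.List.dedup (es.map Prod.fst) := rfl
  rw [hkeys]
  apply List.map_congr_left
  intro k _
  congr 1
  rw [PySem.Dict.getD_foldl_modify_append]
  simp

theorem pv_assoc_filter (l : List (String × String)) (hnd : (l.map Prod.fst).Nodup) (k : String) :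
    l.filter (fun p => p.1 == k)
      = match (PySem.Dict.mk l).get? k with | some v => [(k, v)] | none => [] := by
  induction l with
  | nil => rfl
  | cons a t ih =>
    simp only [List.map_cons, List.nodup_cons] at hnd
    rw [List.filter_cons, PySem.Dict.get?_mk_cons]
    by_cases h : a.1 = k
    · subst h
      simp only [beq_self_eq_true, if_pos]
      have : t.filter (fun p => p.1 == a.1) = [] := by
        apply List.filter_eq_nil_iff.mpr
        intro p hp hq
        have hk : p.1 = a.1 := by simpa using hq
        exact hnd.1 (hk ▸ (List.mem_map_of_mem hp : p.1 ∈ t.map Prod.fst))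
      simp [this]
    · have hb : (a.1 == k) = false := by simpa using h
      simp only [hb, Bool.false_eq_true, if_false]
      exact ih hnd.2

theorem pv_perday (day : List (String × String)) (hnd : (day.map Prod.fst).Nodup) (k : String) (hk : pvKeep k = true) :
    (((day.filter (fun p => pvKeep p.1)).map (fun p => (p.1, pvDatum day p.2))).filter (fun p => p.1 == k)).map Prod.snd
      = (if (PySem.Dict.mk day).contains k then
          [pvDatum day ((PySem.Dict.mk day).getD k "")] else []) := by
  rw [List.filter_map, List.filter_filter]
  have hfuse : day.filter (fun p => ((fun q : String × List (String × String) => q.1 == k) ∘ fun p : String × String => (p.1, pvDatum day p.2)) p && pvKeep p.1)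
      = day.filter (fun p => p.1 == k) := by
    apply List.filter_congr
    intro p _
    simp only [Function.comp]
    by_cases h : p.1 = k
    · simp [h, hk]
    · simp [h]
  rw [hfuse, pv_assoc_filter day hnd k]
  rw [PySem.Dict.contains_eq_isSome_get?]
  cases hg : (PySem.Dict.mk day).get? k with
  | none => simp
  | some v =>
    simp only [Option.isSome_some, if_pos]
    rw [PySem.Dict.getD_of_get?_eq_some _ _ hg]
    simp

theorem pv_perkey (data : List (List (String × String))) (hpre : ∀ day ∈ data, (day.map Prod.fst).Nodup)
    (k : String) (hk : pvKeep k = true) :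
    ((pvEvents data).filter (fun p => p.1 == k)).map Prod.snd
      = (data.filter (fun day => (PySem.Dict.mk day).contains k)).map
          (fun day => pvDatum day ((PySem.Dict.mk day).getD k "")) := by
  induction data with
  | nil => rfl
  | cons day rest ih =>
    simp only [pvEvents, List.flatMap_cons, List.filter_append, List.map_append]
    rw [← pvEvents]
    rw [ih (fun d hd => hpre d (List.mem_cons_of_mem _ hd))]
    rw [pv_perday day (hpre day (List.mem_cons_self)) k hk]
    rw [List.filter_cons]
    by_cases h : (PySem.Dict.mk day).contains k
    · simp [h]
    · simp [h]

theorem pv_keys_comm (t : List (String × String)) :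
    (t.filter (fun p => pvKeep p.1)).map Prod.fst
      = (t.map Prod.fst).filter (fun s => !(s == "date_start" || s == "date_saved")) := by
  induction t with
  | nil => rfl
  | cons a r ih =>
    rw [List.filter_cons, List.map_cons, List.filter_cons]
    by_cases h : pvKeep a.1 = true
    · have h2 : (!(a.1 == "date_start" || a.1 == "date_saved")) = true := h
      simp only [h, h2, if_pos, List.map_cons, ih]
    · have h2 : (!(a.1 == "date_start" || a.1 == "date_saved")) = false := by simpa [pvKeep] using h
      simp only [h, h2, Bool.false_eq_true, if_false, ih]

theorem pv_names (data : List (List (String × String))) :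
    (pvEvents data).map Prod.fst
      = data.flatMap (fun day => (day.map Prod.fst).filter (fun s => !(s == "date_start" || s == "date_saved"))) := by
  simp only [pvEvents, List.map_flatMap]
  congr 1
  funext day
  rw [List.map_map]
  have h1 : (Prod.fst ∘ fun p : String × String => (p.1, pvDatum day p.2)) = Prod.fst := rfl
  rw [h1, pv_keys_comm]

theorem pv_final (data : List (List (String × String)))
    (hpre : ∀ day ∈ data, (day.map Prod.fst).Nodup) :
    convert_to_datum data = convert_to_datum_alt data := by
  rw [pv_outer, pv_grouped, convert_to_datum_alt, ← pv_names]
  apply List.map_congr_left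
  intro k hkmem
  have hk : pvKeep k = true := by
    have : k ∈ (pvEvents data).map Prod.fst := by
      exact (PySem.List.mem_dedup _ _).mp hkmem
    rw [pv_names data] at this
    rcases List.mem_flatMap.mp this with ⟨day, _, hin⟩
    exact List.of_mem_filter hin
  have := pv_perkey data hpre k hk
  rw [this]
  rfl

-- ===== VERDICT (by name: the statement is the Claim_ definition above) =====
theorem convert_to_datum_spec : Claim_equal_convert_to_datum := by
  intro data _ hpre
  show convert_to_datum data = convert_to_datum_alt data
  exact pv_final data (fun day hd => (hpre day hd).2)
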